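-- pv_equiv track=rewrite | github.com/talmage47/UndoneOS | UndoneOS/Memory.py | summarizeRanges
-- ===== SOURCE A (Python) =====
-- def summarizeRanges(statusList):
--     ranges = []
--     if not statusList:
--         return ranges
--
--     start = statusList[0][0]
--     currentType = statusList[0][1]
--
--     for i in range(1, len(statusList)):
--         idx, isZero = statusList[i]
--         if isZero != currentType or idx != statusList[i - 1][0] + 1:
--             end = statusList[i - 1][0]
--             ranges.append((start, end, currentType))
--             start = idx
--             currentType = isZero
--
--     ranges.append((start, statusList[-1][0], currentType))
--     return ranges
-- ===== SOURCE B (Python) =====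
-- def summarizeRanges(statusList):
--     n = len(statusList)
--     if n == 0:
--         return []
--     # phase 1: boundary indices where a new run starts (plus sentinels 0 and n)
--     bounds = [0] + [i for i in range(1, n)
--                     if statusList[i][1] != statusList[i - 1][1]
--                     or statusList[i][0] != statusList[i - 1][0] + 1] + [n]
--     # phase 2: each adjacent boundary pair (a, b) names the run statusList[a:b]
--     return [(statusList[a][0], statusList[b - 1][0], statusList[a][1])
--             for a, b in zip(bounds, bounds[1:])]
-- ===== Notes on version B (the rewrite author's own statement) =====
-- stated objective: alternative
-- what changed: Replaces A's stateful accumulator loop (ranges/start/currentType carried through one pass) by a boundary-index formulation: a comprehension filters the indices where a new run starts, and a second comprehension over zip(bounds, bounds[1:]) reads each run's summary directly out of the list; the break test compares against the previous element instead of carried run state.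
import Mathlib
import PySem

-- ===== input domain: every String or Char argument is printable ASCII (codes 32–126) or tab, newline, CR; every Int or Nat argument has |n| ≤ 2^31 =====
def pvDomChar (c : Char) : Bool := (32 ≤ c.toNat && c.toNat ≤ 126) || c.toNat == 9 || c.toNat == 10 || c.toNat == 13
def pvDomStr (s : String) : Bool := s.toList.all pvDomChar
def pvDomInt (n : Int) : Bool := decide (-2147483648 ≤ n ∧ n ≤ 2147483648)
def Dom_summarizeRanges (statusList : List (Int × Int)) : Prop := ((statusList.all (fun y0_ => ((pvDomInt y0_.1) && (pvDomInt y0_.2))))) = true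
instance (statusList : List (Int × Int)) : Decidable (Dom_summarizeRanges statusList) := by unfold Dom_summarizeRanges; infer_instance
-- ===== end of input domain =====

-- B replaces A's stateful accumulator loop by a boundary-index formulation (filter the
-- run-start indices, then summarize each adjacent boundary pair); same O(n) cost (objective: alternative).

-- ===== PORT A =====
-- A-side helper: the body of A's for-loop (state = (ranges, start, currentType))
def pvStepA (l : List (Int × Int)) (st : List (Int × Int × Int) × Int × Int) (i : Int) :
    List (Int × Int × Int) × Int × Int :=
  if (PySem.List.pyGetD l i (0, 0)).2 ≠ st.2.2 ∨
      (PySem.List.pyGetD l i (0, 0)).1 ≠ (PySem.List.pyGetD l (i - 1) (0, 0)).1 + 1 then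
    (st.1 ++ [(st.2.1, (PySem.List.pyGetD l (i - 1) (0, 0)).1, st.2.2)],
     (PySem.List.pyGetD l i (0, 0)).1, (PySem.List.pyGetD l i (0, 0)).2)
  else st

-- literal transliteration of A: index loop over range(1, len) with state (ranges, start, currentType);
-- the pyGetD defaults are never used (every index accessed is in range for a nonempty list)
def summarizeRanges (statusList : List (Int × Int)) : List (Int × Int × Int) :=
  if statusList = [] then []
  else
    let start := (PySem.List.pyGetD statusList 0 (0, 0)).1
    let currentType := (PySem.List.pyGetD statusList 0 (0, 0)).2
    let st := (PySem.List.pyRange 1 (statusList.length : Int) 1).foldl (pvStepA statusList)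
      (([] : List (Int × Int × Int)), start, currentType)
    st.1 ++ [(st.2.1, (PySem.List.pyGetD statusList (-1) (0, 0)).1, st.2.2)]

-- ===== PORT B =====
-- B-side helper: the filter condition of Source B's bounds comprehension (a new run starts at index i)
def pvBreak (l : List (Int × Int)) (i : Int) : Bool :=
  decide ((PySem.List.pyGetD l i (0, 0)).2 ≠ (PySem.List.pyGetD l (i - 1) (0, 0)).2 ∨
          (PySem.List.pyGetD l i (0, 0)).1 ≠ (PySem.List.pyGetD l (i - 1) (0, 0)).1 + 1)

-- B-side helper: the body of Source B's result comprehension (summary of the run statusList[a:b])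
def pvSumm (l : List (Int × Int)) (p : Int × Int) : Int × Int × Int :=
  ((PySem.List.pyGetD l p.1 (0, 0)).1, (PySem.List.pyGetD l (p.2 - 1) (0, 0)).1,
   (PySem.List.pyGetD l p.1 (0, 0)).2)

-- B-side helper: zip(bounds, bounds[1:])  (the slice bounds[1:] is List.drop 1, exact here)
def pvZipAdj (xs : List Int) : List (Int × Int) := xs.zip (xs.drop 1)

-- literal transliteration of Source B: phase 1 builds the boundary-index list by a filter,
-- phase 2 maps each adjacent boundary pair to a summary
def summarizeRanges_alt (statusList : List (Int × Int)) : List (Int × Int × Int) :=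
  if statusList.length = 0 then []
  else
    let bounds : List Int :=
      [0] ++ (PySem.List.pyRange 1 (statusList.length : Int) 1).filter (pvBreak statusList)
        ++ [(statusList.length : Int)]
    (pvZipAdj bounds).map (pvSumm statusList)

-- ===== PRECONDITION & SPEC =====
def Spec_summarizeRanges (statusList : List (Int × Int)) (out : List (Int × Int × Int)) : Prop := out = summarizeRanges_alt statusList
instance (statusList : List (Int × Int)) (out : List (Int × Int × Int)) : Decidable (Spec_summarizeRanges statusList out) := by unfold Spec_summarizeRanges; infer_instance

-- ===== CLAIM (what is proved, stated in full; the proofs are below) =====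
def Claim_equal_summarizeRanges : Prop := ∀ (statusList : List (Int × Int)), Dom_summarizeRanges statusList → Spec_summarizeRanges statusList (summarizeRanges statusList)

-- ===== LEMMAS AND PROOFS =====

-- adjacent-pair zip of a snoc
theorem pvZipAdj_concat (xs : List Int) (b x : Int) (h : xs.getLast? = some b) :
    pvZipAdj (xs ++ [x]) = pvZipAdj xs ++ [(b, x)] := by
  induction xs with
  | nil => simp at h
  | cons a t ih =>
    cases t with
    | nil =>
      simp only [List.getLast?_singleton, Option.some.injEq] at h
      subst h
      rfl
    | cons c t' =>
      have h' : (c :: t').getLast? = some b := by rwa [List.getLast?_cons_cons] at h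
      show (a, c) :: pvZipAdj ((c :: t') ++ [x]) = ((a, c) :: pvZipAdj (c :: t')) ++ [(b, x)]
      rw [ih h']
      rfl

-- the last valid index equals Python's index -1 on a nonempty list
theorem pvLastIdx (l : List (Int × Int)) (h : l ≠ []) :
    PySem.List.pyGetD l ((l.length : Int) - 1) (0, 0) = PySem.List.pyGetD l (-1) (0, 0) := by
  have h1 : 0 < l.length := List.length_pos_iff.mpr h
  have hc : ((l.length : Int) - 1) = ((l.length - 1 : Nat) : Int) := by push_cast [h1]; ring
  rw [hc, PySem.List.pyGetD_ofNat l (l.length - 1) (0, 0) (by omega),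
    PySem.List.pyGetD_neg_one l (0, 0) h, List.getLast_eq_getElem]

-- core invariant: A's loop from index k, started with the ranges/start/type determined by the
-- boundary list bnds (last boundary b), followed by A's final append, equals B's summary of the
-- completed boundary list
theorem pvMain (l : List (Int × Int)) (hl : l ≠ []) (m : Nat) :
    ∀ (k : Nat), 1 ≤ k → l.length - k = m →
    ∀ (bnds : List Int) (b : Int), bnds.getLast? = some b →
    (PySem.List.pyGetD l b (0, 0)).2 = (PySem.List.pyGetD l ((k : Int) - 1) (0, 0)).2 →
    (let st := (PySem.List.pyRange (k : Int) (l.length : Int) 1).foldl (pvStepA l)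
        ((pvZipAdj bnds).map (pvSumm l),
         (PySem.List.pyGetD l b (0, 0)).1, (PySem.List.pyGetD l b (0, 0)).2)
     st.1 ++ [(st.2.1, (PySem.List.pyGetD l (-1) (0, 0)).1, st.2.2)])
    = (pvZipAdj (bnds ++ (PySem.List.pyRange (k : Int) (l.length : Int) 1).filter (pvBreak l)
        ++ [(l.length : Int)])).map (pvSumm l) := by
  induction m with
  | zero =>
    intro k hk hm bnds b hlast htyp
    have hle : (l.length : Int) ≤ (k : Int) := by exact_mod_cast Nat.le_of_sub_eq_zero hm
    rw [PySem.List.pyRange_one_eq_nil hle]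
    simp only [List.foldl_nil, List.filter_nil, List.append_nil]
    rw [pvZipAdj_concat bnds b _ hlast, List.map_append]
    simp only [List.map_cons, List.map_nil, pvSumm]
    rw [pvLastIdx l hl]
  | succ m ih =>
    intro k hk hm bnds b hlast htyp
    have hklt : k < l.length := by omega
    have hlt : (k : Int) < (l.length : Int) := by exact_mod_cast hklt
    rw [PySem.List.pyRange_one_cons hlt, List.foldl_cons, List.filter_cons]
    have hcast : ((k : Int) + 1) = ((k + 1 : Nat) : Int) := by push_cast; ring
    have hcast2 : (((k + 1 : Nat) : Int) - 1) = (k : Int) := by push_cast; ring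
    by_cases hbk : ((PySem.List.pyGetD l (k : Int) (0, 0)).2 ≠ (PySem.List.pyGetD l ((k : Int) - 1) (0, 0)).2 ∨
        (PySem.List.pyGetD l (k : Int) (0, 0)).1 ≠ (PySem.List.pyGetD l ((k : Int) - 1) (0, 0)).1 + 1)
    · -- a new run starts at k
      have hb : pvBreak l (k : Int) = true := by simp only [pvBreak, decide_eq_true_eq]; exact hbk
      have hstep : pvStepA l ((pvZipAdj bnds).map (pvSumm l),
          (PySem.List.pyGetD l b (0, 0)).1, (PySem.List.pyGetD l b (0, 0)).2) (k : Int)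
          = ((pvZipAdj (bnds ++ [(k : Int)])).map (pvSumm l),
             (PySem.List.pyGetD l (k : Int) (0, 0)).1, (PySem.List.pyGetD l (k : Int) (0, 0)).2) := by
        unfold pvStepA
        split_ifs with hc
        · rw [pvZipAdj_concat bnds b _ hlast, List.map_append]
          simp only [List.map_cons, List.map_nil, pvSumm]
        · exfalso
          rcases hbk with h | h
          · have h' : (PySem.List.pyGetD l (k : Int) (0, 0)).2 ≠ (PySem.List.pyGetD l b (0, 0)).2 := by
              rw [htyp]; exact h
            exact absurd (Or.inl h') hc
          · exact absurd (Or.inr h) hc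
      rw [hb, hstep, hcast]
      have hlast' : (bnds ++ [(k : Int)]).getLast? = some ((k : Int)) := by simp
      have htyp' : (PySem.List.pyGetD l (k : Int) (0, 0)).2
          = (PySem.List.pyGetD l (((k + 1 : Nat) : Int) - 1) (0, 0)).2 := by rw [hcast2]
      have hih := ih (k + 1) (by omega) (by omega) (bnds ++ [(k : Int)]) (k : Int) hlast' htyp'
      simp only [if_true, List.append_assoc, List.cons_append, List.nil_append] at hih ⊢
      exact hih
    · -- the run continues through k
      have hb : pvBreak l (k : Int) = false := by
        simp only [pvBreak, decide_eq_false_iff_not]; exact hbk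
      rw [not_or, not_ne_iff, not_ne_iff] at hbk
      have hstep : pvStepA l ((pvZipAdj bnds).map (pvSumm l),
          (PySem.List.pyGetD l b (0, 0)).1, (PySem.List.pyGetD l b (0, 0)).2) (k : Int)
          = ((pvZipAdj bnds).map (pvSumm l),
             (PySem.List.pyGetD l b (0, 0)).1, (PySem.List.pyGetD l b (0, 0)).2) := by
        unfold pvStepA
        split_ifs with hc
        · exfalso
          rcases hc with h | h
          · have h' : (PySem.List.pyGetD l (k : Int) (0, 0)).2 = (PySem.List.pyGetD l b (0, 0)).2 := by
              rw [htyp]; exact hbk.1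
            exact h h'
          · exact h hbk.2
        · rfl
      rw [hb, hstep, hcast]
      have htyp' : (PySem.List.pyGetD l b (0, 0)).2
          = (PySem.List.pyGetD l (((k + 1 : Nat) : Int) - 1) (0, 0)).2 := by
        rw [hcast2, hbk.1]; exact htyp
      exact ih (k + 1) (by omega) (by omega) bnds b hlast htyp'

-- ===== VERDICT (by name: the statement is the Claim_ definition above) =====
theorem summarizeRanges_spec : Claim_equal_summarizeRanges := by
  intro statusList _
  unfold Spec_summarizeRanges
  cases statusList with
  | nil => rfl
  | cons e0 rest =>
    unfold summarizeRanges summarizeRanges_alt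
    rw [if_neg (by simp), if_neg (by simp)]
    have hmain := pvMain (e0 :: rest) (by simp) ((e0 :: rest).length - 1) 1 le_rfl rfl
      [0] 0 rfl (by norm_num)
    simp only [Nat.cast_one] at hmain
    exact hmain
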